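-- pv_equiv track=rewrite | github.com/CryoEntropy/HomCount-SmallGroups | Find_Equal_Four_Hom_Counts.py | find_equal_hom_pairs
-- ===== SOURCE A (Python) =====
-- def find_equal_hom_pairs(matrix):
--     """查找满足条件的群对，排除同一群自身的情况"""
--     n = len(matrix)  # 群的数量（51）
--     results = []
--
--     # 检查所有不同的群对 (i, j), i ≠ j
--     for i in range(n):
--         for j in range(i + 1, n):  # 注意：从i+1开始，确保i≠j
--             # 获取四个同态计数
--             hom_GG = matrix[i][i]  # |Hom(G,G)|
--             hom_HG = matrix[j][i]  # |Hom(H,G)|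
--             hom_GH = matrix[i][j]  # |Hom(G,H)|
--             hom_HH = matrix[j][j]  # |Hom(H,H)|
--
--             # 检查是否全部相等
--             if hom_GG == hom_HG == hom_GH == hom_HH:
--                 results.append((i, j, hom_GG))
--
--     return results
-- ===== SOURCE B (Python) =====
-- def find_equal_hom_pairs(matrix):
--     """Group indices by diagonal value; only equal-diagonal indices can match."""
--     n = len(matrix)
--     groups = {}
--     for i in range(n):
--         groups.setdefault(matrix[i][i], []).append(i)
--     results = []
--     for i in range(n):
--         v = matrix[i][i]
--         for j in groups[v]:
--             if i < j and matrix[i][j] == v and matrix[j][i] == v: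
--                 results.append((i, j, v))
--     return results
-- ===== Notes on version B (the rewrite author's own statement) =====
-- stated objective: alternative
-- what changed: Instead of testing every pair (i,j) with a double loop, B first builds a dict grouping row indices by their diagonal value and then only inspects within-group pairs (equal diagonals are necessary for the four-way equality), emitting results in the same ascending (i,j) order.
-- outside the precondition, e.g. on find_equal_hom_pairs([[]]): A returns [], B raises IndexError
import Mathlib
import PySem

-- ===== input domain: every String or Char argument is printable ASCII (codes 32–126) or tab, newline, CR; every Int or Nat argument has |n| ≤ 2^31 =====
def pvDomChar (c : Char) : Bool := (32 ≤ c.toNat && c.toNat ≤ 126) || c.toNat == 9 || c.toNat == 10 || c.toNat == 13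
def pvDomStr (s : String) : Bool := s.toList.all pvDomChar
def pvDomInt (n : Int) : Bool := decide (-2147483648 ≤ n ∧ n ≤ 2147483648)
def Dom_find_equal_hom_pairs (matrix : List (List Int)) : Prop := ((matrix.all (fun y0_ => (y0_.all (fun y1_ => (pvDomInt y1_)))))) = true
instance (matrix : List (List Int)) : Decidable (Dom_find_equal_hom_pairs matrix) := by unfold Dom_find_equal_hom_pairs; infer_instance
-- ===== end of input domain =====

-- B groups indices by their diagonal value in a dict and only checks within-group pairs
-- (equal diagonals are necessary for the four-way equality); objective: alternative decomposition.

-- ===== PORT A =====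
def find_equal_hom_pairs (matrix : List (List Int)) : List (Int × Int × Int) :=
  let n : Int := (matrix.length : Int)
  (PySem.List.pyRange 0 n 1).foldl (fun results i =>
    (PySem.List.pyRange (i + 1) n 1).foldl (fun results j =>
      let hom_GG := PySem.List.pyGetD (PySem.List.pyGetD matrix i []) i 0
      let hom_HG := PySem.List.pyGetD (PySem.List.pyGetD matrix j []) i 0
      let hom_GH := PySem.List.pyGetD (PySem.List.pyGetD matrix i []) j 0
      let hom_HH := PySem.List.pyGetD (PySem.List.pyGetD matrix j []) j 0
      if hom_GG = hom_HG ∧ hom_HG = hom_GH ∧ hom_GH = hom_HH then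
        results ++ [(i, j, hom_GG)]
      else results) results) []

-- ===== PORT B =====
def find_equal_hom_pairs_alt (matrix : List (List Int)) : List (Int × Int × Int) :=
  let n : Int := (matrix.length : Int)
  let groups : PySem.Dict Int (List Int) :=
    (PySem.List.pyRange 0 n 1).foldl (fun d i =>
      d.modify (PySem.List.pyGetD (PySem.List.pyGetD matrix i []) i 0) [] (· ++ [i]))
      PySem.Dict.empty
  (PySem.List.pyRange 0 n 1).foldl (fun results i =>
    let v := PySem.List.pyGetD (PySem.List.pyGetD matrix i []) i 0
    (groups.getD v []).foldl (fun results j =>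
      if i < j ∧ PySem.List.pyGetD (PySem.List.pyGetD matrix i []) j 0 = v ∧
          PySem.List.pyGetD (PySem.List.pyGetD matrix j []) i 0 = v then
        results ++ [(i, j, v)]
      else results) results) []

-- ===== PRECONDITION & SPEC =====
-- Pre_ excludes ragged matrices with a row shorter than the matrix: A raises IndexError on all of them
-- except when the matrix is a single too-short row, where A still returns an empty result but B, which reads every
-- diagonal entry before pairing, raises IndexError.
def Pre_find_equal_hom_pairs (matrix : List (List Int)) : Prop :=
  ∀ row ∈ matrix, matrix.length ≤ row.length
instance (matrix : List (List Int)) : Decidable (Pre_find_equal_hom_pairs matrix) := by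
  unfold Pre_find_equal_hom_pairs; infer_instance
def pvWitness_find_equal_hom_pairs : List (List Int) := [[2, 2], [2, 2]]
def Spec_find_equal_hom_pairs (matrix : List (List Int)) (out : List (Int × Int × Int)) : Prop := out = find_equal_hom_pairs_alt matrix
instance (matrix : List (List Int)) (out : List (Int × Int × Int)) : Decidable (Spec_find_equal_hom_pairs matrix out) := by unfold Spec_find_equal_hom_pairs; infer_instance

-- ===== CLAIM (what is proved, stated in full; the proofs are below) =====
def Claim_equal_find_equal_hom_pairs : Prop := ∀ (matrix : List (List Int)), Dom_find_equal_hom_pairs matrix → Pre_find_equal_hom_pairs matrix → Spec_find_equal_hom_pairs matrix (find_equal_hom_pairs matrix)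

-- ===== LEMMAS AND PROOFS =====

-- matrix[i][j] as both ports read it
def pvEnt (matrix : List (List Int)) (i j : Int) : Int :=
  PySem.List.pyGetD (PySem.List.pyGetD matrix i []) j 0

-- A's per-i block as a filter-map
def pvFA (matrix : List (List Int)) (n i : Int) : List (Int × Int × Int) :=
  ((PySem.List.pyRange (i + 1) n 1).filter (fun j =>
      decide (pvEnt matrix i i = pvEnt matrix j i ∧ pvEnt matrix j i = pvEnt matrix i j ∧
        pvEnt matrix i j = pvEnt matrix j j))).map (fun j => (i, j, pvEnt matrix i i))

-- B's per-i block as a filter-map (group list, then the in-loop test)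
def pvFB (matrix : List (List Int)) (n i : Int) : List (Int × Int × Int) :=
  (((PySem.List.pyRange 0 n 1).filter (fun j => pvEnt matrix j j == pvEnt matrix i i)).filter
      (fun j => decide (i < j ∧ pvEnt matrix i j = pvEnt matrix i i ∧
        pvEnt matrix j i = pvEnt matrix i i))).map (fun j => (i, j, pvEnt matrix i i))

-- the group dict's entry at c is the ascending list of indices with diagonal value c
theorem pv_groups_getD (matrix : List (List Int)) (n c : Int) :
    ((PySem.List.pyRange 0 n 1).foldl (fun d i =>
        d.modify (pvEnt matrix i i) [] (· ++ [i])) PySem.Dict.empty).getD c []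
      = (PySem.List.pyRange 0 n 1).filter (fun i => pvEnt matrix i i == c) := by
  have h1 : (PySem.List.pyRange 0 n 1).foldl (fun d i =>
        d.modify (pvEnt matrix i i) [] (· ++ [i])) PySem.Dict.empty
      = ((PySem.List.pyRange 0 n 1).map (fun i => (pvEnt matrix i i, i))).foldl
          (fun d p => d.modify p.1 [] (· ++ [p.2])) PySem.Dict.empty := by
    rw [List.foldl_map]
  rw [h1, PySem.Dict.getD_foldl_modify_append, PySem.Dict.getD_empty]
  rw [List.filter_map]
  simp [Function.comp_def]

theorem pv_portA_eq (matrix : List (List Int)) :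
    find_equal_hom_pairs matrix
      = (PySem.List.pyRange 0 (matrix.length : Int) 1).flatMap
          (pvFA matrix (matrix.length : Int)) := by
  show (PySem.List.pyRange 0 (matrix.length : Int) 1).foldl (fun results i =>
      (PySem.List.pyRange (i + 1) (matrix.length : Int) 1).foldl (fun results j =>
        if pvEnt matrix i i = pvEnt matrix j i ∧ pvEnt matrix j i = pvEnt matrix i j ∧
            pvEnt matrix i j = pvEnt matrix j j then
          results ++ [(i, j, pvEnt matrix i i)]
        else results) results) [] = _
  rw [← List.nil_append (List.flatMap _ _), ← PySem.List.foldl_append_eq_flatMap]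
  apply PySem.List.foldl_congr_mem
  intro acc i _
  exact PySem.List.foldl_append_ite _ _ _ _

theorem pv_portB_eq (matrix : List (List Int)) :
    find_equal_hom_pairs_alt matrix
      = (PySem.List.pyRange 0 (matrix.length : Int) 1).flatMap
          (pvFB matrix (matrix.length : Int)) := by
  show (PySem.List.pyRange 0 (matrix.length : Int) 1).foldl (fun results i =>
      (((PySem.List.pyRange 0 (matrix.length : Int) 1).foldl (fun d k =>
          d.modify (pvEnt matrix k k) [] (· ++ [k])) PySem.Dict.empty).getD
            (pvEnt matrix i i) []).foldl (fun results j =>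
        if i < j ∧ pvEnt matrix i j = pvEnt matrix i i ∧
            pvEnt matrix j i = pvEnt matrix i i then
          results ++ [(i, j, pvEnt matrix i i)]
        else results) results) [] = _
  rw [← List.nil_append (List.flatMap _ _), ← PySem.List.foldl_append_eq_flatMap]
  apply PySem.List.foldl_congr_mem
  intro acc i _
  rw [pv_groups_getD matrix (matrix.length : Int) (pvEnt matrix i i)]
  exact PySem.List.foldl_append_ite _ _ _ _

-- the two per-i blocks coincide for i in range
theorem pv_block_eq (matrix : List (List Int)) (n i : Int) (hi : 0 ≤ i) (hin : i < n) :
    pvFB matrix n i = pvFA matrix n i := by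
  unfold pvFA pvFB
  congr 1
  rw [List.filter_filter]
  rw [PySem.List.pyRange_one_append 0 (i + 1) n (by omega) (by omega), List.filter_append]
  have h0 : (PySem.List.pyRange 0 (i + 1) 1).filter (fun j =>
      decide (i < j ∧ pvEnt matrix i j = pvEnt matrix i i ∧
        pvEnt matrix j i = pvEnt matrix i i) && (pvEnt matrix j j == pvEnt matrix i i)) = [] := by
    rw [List.filter_eq_nil_iff]
    intro j hj
    rw [PySem.List.mem_pyRange_one] at hj
    simp only [Bool.and_eq_true, decide_eq_true_eq]
    rintro ⟨⟨h1, -⟩, -⟩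
    omega
  rw [h0, List.nil_append]
  apply List.filter_congr
  intro j hj
  rw [PySem.List.mem_pyRange_one] at hj
  rw [Bool.eq_iff_iff]
  simp only [Bool.and_eq_true, decide_eq_true_eq, beq_iff_eq]
  constructor
  · rintro ⟨⟨-, h2, h3⟩, h4⟩
    exact ⟨by omega, by omega, by omega⟩
  · rintro ⟨h1, h2, h3⟩
    exact ⟨⟨by omega, by omega, by omega⟩, by omega⟩

-- ===== VERDICT (by name: the statement is the Claim_ definition above) =====
theorem find_equal_hom_pairs_spec : Claim_equal_find_equal_hom_pairs := by
  intro matrix _ _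
  show find_equal_hom_pairs matrix = find_equal_hom_pairs_alt matrix
  rw [pv_portA_eq, pv_portB_eq]
  apply List.flatMap_congr
  intro i hi
  rw [PySem.List.mem_pyRange_one] at hi
  exact (pv_block_eq matrix _ i hi.1 hi.2).symm
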